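-- pv_equiv track=rewrite | github.com/scottjones03/QEC-Lib | src/qectostim/experiments/hardware_simulation/trapped_ion/utils/gadget_routing.py | _split_shared_ion_rounds
-- ===== SOURCE A (Python) =====
-- from typing import (
--     Collection,
--     Dict,
--     List,
--     Optional,
--     Set,
--     Tuple,
--     Any,
--     TYPE_CHECKING,
-- )
--
-- def _split_shared_ion_rounds(
--     phase_pairs: List[List[Tuple[int, int]]],
-- ) -> List[List[Tuple[int, int]]]:
--     """Split routing rounds where an ion appears in multiple pairs.
--
--     The SAT solver requires **all** pairs within a round to be co-located
--     simultaneously (same row + same trap block).  When pairs share a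
--     common ion (e.g. bridge ancilla in CSS Surgery), simultaneous
--     co-location is physically impossible, and the solver returns UNSAT.
--
--     This function detects such rounds and splits them into sub-rounds
--     where every pair's ions are disjoint.  The greedy packing maximises
--     parallelism within each sub-round (different bridge ancillas whose
--     data qubits don't overlap can still share a sub-round).
--
--     Rounds that already have fully disjoint pairs are returned as-is.
--     """
--     result: List[List[Tuple[int, int]]] = []
--     for pairs in phase_pairs:
--         if not pairs:
--             result.append(pairs)
--             continue
--         # Quick check: any ion appears more than once?
--         ion_counts: Dict[int, int] = {}
--         for a, b in pairs:
--             ion_counts[a] = ion_counts.get(a, 0) + 1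
--             ion_counts[b] = ion_counts.get(b, 0) + 1
--         has_shared = any(c > 1 for c in ion_counts.values())
--         if not has_shared:
--             result.append(pairs)
--             continue
--         # Greedy packing into disjoint sub-rounds
--         remaining = list(pairs)
--         while remaining:
--             sub_round: List[Tuple[int, int]] = []
--             used_ions: set = set()
--             leftover: List[Tuple[int, int]] = []
--             for pair in remaining:
--                 a, b = pair
--                 if a not in used_ions and b not in used_ions:
--                     sub_round.append(pair)
--                     used_ions.add(a)
--                     used_ions.add(b)
--                 else:
--                     leftover.append(pair)
--             result.append(sub_round)
--             remaining = leftover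
--     return result
-- ===== SOURCE B (Python) =====
-- from typing import List, Tuple
--
-- def _split_shared_ion_rounds(
--     phase_pairs: List[List[Tuple[int, int]]],
-- ) -> List[List[Tuple[int, int]]]:
--     """Single-pass first-fit packing: each pair goes into the first existing
--     sub-round whose ions are all disjoint from it, else opens a new sub-round.
--     Equivalent to A's repeated greedy extraction of disjoint sub-rounds."""
--     result: List[List[Tuple[int, int]]] = []
--     for pairs in phase_pairs:
--         if not pairs:
--             result.append(pairs)
--             continue
--         buckets: List[List[Tuple[int, int]]] = []
--         for a, b in pairs:
--             placed = False
--             for bucket in buckets: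
--                 if all(a != x and a != y and b != x and b != y for x, y in bucket):
--                     bucket.append((a, b))
--                     placed = True
--                     break
--             if not placed:
--                 buckets.append([(a, b)])
--         result.extend(buckets)
--     return result
-- ===== Notes on version B (the rewrite author's own statement) =====
-- stated objective: alternative
-- what changed: Replaces the repeated while-loop extraction of maximal disjoint sub-rounds (re-scanning the leftover list each pass, plus a separate ion-count pre-check) with a single first-fit pass that drops each pair into the first existing sub-round with disjoint ions, opening a new one otherwise.
import Mathlib
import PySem

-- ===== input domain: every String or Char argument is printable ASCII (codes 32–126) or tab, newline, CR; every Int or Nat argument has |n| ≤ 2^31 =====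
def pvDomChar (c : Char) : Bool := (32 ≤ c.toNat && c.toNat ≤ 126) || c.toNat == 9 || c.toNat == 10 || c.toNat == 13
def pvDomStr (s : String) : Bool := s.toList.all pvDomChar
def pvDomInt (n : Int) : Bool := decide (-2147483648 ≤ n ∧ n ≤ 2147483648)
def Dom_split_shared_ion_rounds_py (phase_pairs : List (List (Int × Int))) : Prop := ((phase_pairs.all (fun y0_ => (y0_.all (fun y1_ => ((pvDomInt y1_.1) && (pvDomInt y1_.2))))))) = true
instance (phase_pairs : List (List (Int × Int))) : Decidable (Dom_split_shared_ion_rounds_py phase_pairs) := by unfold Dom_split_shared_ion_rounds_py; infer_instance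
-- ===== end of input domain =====

-- B replaces A's repeated greedy extraction of disjoint sub-rounds (while loop over leftovers,
-- plus an ion-count pre-check) with a single first-fit pass over the pairs; same result, proved equal.

-- ===== PORT A =====
-- one pass of A's while body: scan `remaining`, splitting into (sub_round, leftover) with a used-ion set
def pvPassA : List (Int × Int) → List (Int × Int) → PySem.Set Int → List (Int × Int) → (List (Int × Int)) × (List (Int × Int))
  | [], sub, _used, leftover => (sub, leftover)
  | p :: rest, sub, used, leftover =>
    if PySem.Set.contains used p.1 = false ∧ PySem.Set.contains used p.2 = false then
      pvPassA rest (sub ++ [p]) (PySem.Set.add (PySem.Set.add used p.1) p.2) leftover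
    else
      pvPassA rest sub used (leftover ++ [p])

-- accumulator lemma for pvPassA (needed by pvGreedy's termination proof, cited there by name)
theorem pvPassA_acc (xs : List (Int × Int)) : ∀ (sub leftover : List (Int × Int)) (used : PySem.Set Int),
    pvPassA xs sub used leftover = (sub ++ (pvPassA xs [] used []).1, leftover ++ (pvPassA xs [] used []).2) := by
  induction xs with
  | nil => intro sub leftover used; simp [pvPassA]
  | cons p rest ih =>
    intro sub leftover used
    by_cases h : PySem.Set.contains used p.1 = false ∧ PySem.Set.contains used p.2 = false
    · simp only [pvPassA, if_pos h]
      rw [ih (sub ++ [p]) leftover, ih ([] ++ [p]) []]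
      simp
    · simp only [pvPassA, if_neg h]
      rw [ih sub (leftover ++ [p]), ih [] ([] ++ [p])]
      simp
theorem pvPassA_snd_le (xs : List (Int × Int)) : ∀ (used : PySem.Set Int),
    ((pvPassA xs [] used []).2).length ≤ xs.length := by
  induction xs with
  | nil => intro used; simp [pvPassA]
  | cons p rest ih =>
    intro used
    by_cases h : PySem.Set.contains used p.1 = false ∧ PySem.Set.contains used p.2 = false
    · simp only [pvPassA, if_pos h]
      rw [pvPassA_acc]
      simpa using Nat.le_succ_of_le (ih _)
    · simp only [pvPassA, if_neg h]
      rw [pvPassA_acc]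
      simpa using ih used

theorem pvPassA_head_lt (p : Int × Int) (rest : List (Int × Int)) :
    ((pvPassA (p :: rest) [] PySem.Set.empty []).2).length < (p :: rest).length := by
  have h : PySem.Set.contains PySem.Set.empty p.1 = false ∧ PySem.Set.contains PySem.Set.empty p.2 = false := by
    constructor <;> simp [PySem.Set.empty, PySem.Set.contains]
  simp only [pvPassA, if_pos h]
  rw [pvPassA_acc]
  simpa using Nat.lt_succ_of_le (pvPassA_snd_le rest _)

-- A's `while remaining:` loop, collecting the appended sub-rounds
def pvGreedy : List (Int × Int) → List (List (Int × Int))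
  | [] => []
  | p :: rest =>
    (pvPassA (p :: rest) [] PySem.Set.empty []).1 :: pvGreedy (pvPassA (p :: rest) [] PySem.Set.empty []).2
termination_by xs => xs.length
decreasing_by exact pvPassA_head_lt p rest

def split_shared_ion_rounds_py (phase_pairs : List (List (Int × Int))) : List (List (Int × Int)) :=
  phase_pairs.foldl (fun result pairs =>
    if pairs = [] then result ++ [pairs]
    else
      let ion_counts := pairs.foldl (fun d (p : Int × Int) =>
        let d1 := d.insert p.1 (d.getD p.1 0 + 1)
        d1.insert p.2 (d1.getD p.2 0 + 1)) (PySem.Dict.empty : PySem.Dict Int Int)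
      let has_shared := ion_counts.values.any (fun c => decide (1 < c))
      if has_shared = false then result ++ [pairs]
      else result ++ pvGreedy pairs) []

-- ===== PORT B =====
-- first-fit: put p into the first bucket all of whose pairs are ion-disjoint from p, else a new bucket
def pvPlace : List (List (Int × Int)) → (Int × Int) → List (List (Int × Int))
  | [], p => [[p]]
  | bkt :: rest, p =>
    if bkt.all (fun q => (p.1 != q.1) && (p.1 != q.2) && (p.2 != q.1) && (p.2 != q.2)) then
      (bkt ++ [p]) :: rest
    else bkt :: pvPlace rest p

def split_shared_ion_rounds_py_alt (phase_pairs : List (List (Int × Int))) : List (List (Int × Int)) :=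
  phase_pairs.foldl (fun result pairs =>
    if pairs = [] then result ++ [pairs]
    else result ++ pairs.foldl pvPlace []) []

-- ===== PRECONDITION & SPEC =====
def Spec_split_shared_ion_rounds_py (phase_pairs : List (List (Int × Int))) (out : List (List (Int × Int))) : Prop := out = split_shared_ion_rounds_py_alt phase_pairs
instance (phase_pairs : List (List (Int × Int))) (out : List (List (Int × Int))) : Decidable (Spec_split_shared_ion_rounds_py phase_pairs out) := by unfold Spec_split_shared_ion_rounds_py; infer_instance

-- ===== CLAIM (what is proved, stated in full; the proofs are below) =====
def Claim_equal_split_shared_ion_rounds_py : Prop := ∀ (phase_pairs : List (List (Int × Int))), Dom_split_shared_ion_rounds_py phase_pairs → Spec_split_shared_ion_rounds_py phase_pairs (split_shared_ion_rounds_py phase_pairs)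

-- ===== LEMMAS AND PROOFS =====

-- the multiset of ions occurring in a list of pairs, as a list
def pvIons (b : List (Int × Int)) : List Int := b.flatMap (fun q => [q.1, q.2])

theorem pvIons_append (b c : List (Int × Int)) : pvIons (b ++ c) = pvIons b ++ pvIons c := by
  simp [pvIons]

theorem pvPlace_cond_iff (b : List (Int × Int)) (p : Int × Int) :
    (b.all (fun q => (p.1 != q.1) && (p.1 != q.2) && (p.2 != q.1) && (p.2 != q.2)) = true)
      ↔ (p.1 ∉ pvIons b ∧ p.2 ∉ pvIons b) := by
  simp only [List.all_eq_true, Bool.and_eq_true, bne_iff_ne, ne_eq, pvIons, List.mem_flatMap,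
    List.mem_cons, List.not_mem_nil, or_false]
  constructor
  · intro h
    constructor
    · rintro ⟨q, hq, h1 | h1⟩ <;> have := h q hq <;> tauto
    · rintro ⟨q, hq, h1 | h1⟩ <;> have := h q hq <;> tauto
  · rintro ⟨h1, h2⟩ q hq
    refine ⟨⟨⟨fun he => ?_, fun he => ?_⟩, fun he => ?_⟩, fun he => ?_⟩
    · exact h1 ⟨q, hq, Or.inl he⟩
    · exact h1 ⟨q, hq, Or.inr he⟩
    · exact h2 ⟨q, hq, Or.inl he⟩
    · exact h2 ⟨q, hq, Or.inr he⟩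

-- the first-fit fold on (b :: bs) performs exactly one greedy pass into bucket b,
-- recursing on the leftover into the lower buckets
theorem foldl_place_pass (xs : List (Int × Int)) : ∀ (b : List (Int × Int)) (bs : List (List (Int × Int))) (used : PySem.Set Int),
    (∀ i : Int, i ∈ used ↔ i ∈ pvIons b) →
    List.foldl pvPlace (b :: bs) xs
      = (b ++ (pvPassA xs [] used []).1) :: List.foldl pvPlace bs (pvPassA xs [] used []).2 := by
  induction xs with
  | nil => intro b bs used _; simp [pvPassA]
  | cons p rest ih =>
    intro b bs used hu
    have hc : ∀ i : Int, (PySem.Set.contains used i = false) ↔ i ∉ pvIons b := by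
      intro i
      rw [← hu i, ← PySem.Set.contains_iff]
      cases PySem.Set.contains used i <;> simp
    have hcond : (PySem.Set.contains used p.1 = false ∧ PySem.Set.contains used p.2 = false)
        ↔ (b.all (fun q => (p.1 != q.1) && (p.1 != q.2) && (p.2 != q.1) && (p.2 != q.2)) = true) := by
      rw [pvPlace_cond_iff, hc p.1, hc p.2]
    by_cases h : PySem.Set.contains used p.1 = false ∧ PySem.Set.contains used p.2 = false
    · have hb := hcond.mp h
      simp only [pvPassA, if_pos h, List.foldl_cons, pvPlace, if_pos hb]
      rw [ih (b ++ [p]) bs ((PySem.Set.add used p.1).add p.2) ?_, pvPassA_acc rest ([] ++ [p]) []]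
      · simp
      · intro i
        simp only [PySem.Set.mem_add, hu i, pvIons_append]
        simp [pvIons, or_assoc]
    · have hb : ¬ (b.all (fun q => (p.1 != q.1) && (p.1 != q.2) && (p.2 != q.1) && (p.2 != q.2)) = true) :=
        fun hc => h (hcond.mpr hc)
      simp only [pvPassA, if_neg h, List.foldl_cons, pvPlace, if_neg hb]
      rw [ih b (pvPlace bs p) used hu, pvPassA_acc rest [] ([] ++ [p])]
      simp

theorem pvGreedy_eq_foldl_place (xs : List (Int × Int)) : pvGreedy xs = xs.foldl pvPlace [] := by
  induction xs using pvGreedy.induct with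
  | case1 => simp [pvGreedy]
  | case2 p rest ih =>
    have h : PySem.Set.contains PySem.Set.empty p.1 = false ∧ PySem.Set.contains PySem.Set.empty p.2 = false := by
      constructor <;> simp [PySem.Set.empty, PySem.Set.contains]
    have hstep : pvPassA (p :: rest) [] PySem.Set.empty []
        = ([p] ++ (pvPassA rest [] (PySem.Set.add (PySem.Set.add PySem.Set.empty p.1) p.2) []).1,
           (pvPassA rest [] (PySem.Set.add (PySem.Set.add PySem.Set.empty p.1) p.2) []).2) := by
      simp only [pvPassA, if_pos h]
      rw [pvPassA_acc rest ([] ++ [p]) []]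
      simp
    have hmem : ∀ i : Int, i ∈ PySem.Set.add (PySem.Set.add PySem.Set.empty p.1) p.2 ↔ i ∈ pvIons [p] := by
      intro i
      simp [PySem.Set.mem_add, PySem.Set.empty, pvIons, or_comm]
    rw [hstep] at ih
    simp only at ih
    rw [pvGreedy, hstep]
    simp only [List.foldl_cons]
    rw [show pvPlace [] p = [[p]] from rfl,
        foldl_place_pass rest [p] [] (PySem.Set.add (PySem.Set.add PySem.Set.empty p.1) p.2) hmem, ih]

-- A's ion-count loop is Counter(ions)
theorem pvCounts_eq_counter (pairs : List (Int × Int)) :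
    pairs.foldl (fun d (p : Int × Int) =>
        let d1 := d.insert p.1 (d.getD p.1 0 + 1)
        d1.insert p.2 (d1.getD p.2 0 + 1)) (PySem.Dict.empty : PySem.Dict Int Int)
      = PySem.Dict.counter (pvIons pairs) := by
  rw [← PySem.Dict.foldl_insert_getD_add_one_eq_counter]
  suffices h : ∀ d : PySem.Dict Int Int,
      pairs.foldl (fun d (p : Int × Int) =>
        let d1 := d.insert p.1 (d.getD p.1 0 + 1)
        d1.insert p.2 (d1.getD p.2 0 + 1)) d
      = (pvIons pairs).foldl (fun d x => d.insert x (d.getD x 0 + 1)) d by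
    exact h _
  induction pairs with
  | nil => intro d; simp [pvIons]
  | cons p rest ih => intro d; simp only [pvIons, List.flatMap_cons, List.foldl_cons, List.foldl_append] at *; rw [ih]; rfl

theorem pvNoShared_nodup (pairs : List (Int × Int))
    (h : (PySem.Dict.counter (pvIons pairs)).values.any (fun c => decide (1 < c)) = false) :
    (pvIons pairs).Nodup := by
  rw [List.nodup_iff_count_le_one]
  intro a
  by_cases ha : a ∈ pvIons pairs
  · have hmem : ((pvIons pairs).count a : Int) ∈ (PySem.Dict.counter (pvIons pairs)).values := by
      rw [show (PySem.Dict.counter (pvIons pairs)).values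
            = ((PySem.Dict.counter (pvIons pairs)).items).map (fun q => q.2) from rfl,
          PySem.Dict.items_counter, List.map_map]
      exact List.mem_map.mpr ⟨a, (PySem.Set.mem_ofList _ _).mpr ha, rfl⟩
    have := (List.any_eq_false.mp h) _ hmem
    simp only [decide_eq_true_eq] at this
    omega
  · simp [List.count_eq_zero_of_not_mem ha]

-- first-fit on globally distinct ions keeps everything in one bucket
theorem foldl_place_nodup (xs : List (Int × Int)) : ∀ (b : List (Int × Int)),
    (pvIons (b ++ xs)).Nodup → List.foldl pvPlace [b] xs = [b ++ xs] := by
  induction xs with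
  | nil => intro b _; simp
  | cons p rest ih =>
    intro b hnd
    have hsplit : pvIons (b ++ p :: rest) = pvIons b ++ (p.1 :: p.2 :: pvIons rest) := by
      simp [pvIons]
    rw [hsplit] at hnd
    have hd := List.disjoint_of_nodup_append hnd
    have h1 : p.1 ∉ pvIons b := fun hm => hd hm (by simp)
    have h2 : p.2 ∉ pvIons b := fun hm => hd hm (by simp)
    have hcond := (pvPlace_cond_iff b p).mpr ⟨h1, h2⟩
    simp only [List.foldl_cons, pvPlace, if_pos hcond]
    have : (pvIons ((b ++ [p]) ++ rest)).Nodup := by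
      rw [show (b ++ [p]) ++ rest = b ++ p :: rest by simp, hsplit]
      exact hnd
    rw [ih (b ++ [p]) this]
    simp

-- A's per-round step equals B's per-round step
theorem pvStep_eq (result : List (List (Int × Int))) (pairs : List (Int × Int)) :
    (if pairs = [] then result ++ [pairs]
     else
       let ion_counts := pairs.foldl (fun d (p : Int × Int) =>
         let d1 := d.insert p.1 (d.getD p.1 0 + 1)
         d1.insert p.2 (d1.getD p.2 0 + 1)) (PySem.Dict.empty : PySem.Dict Int Int)
       let has_shared := ion_counts.values.any (fun c => decide (1 < c))
       if has_shared = false then result ++ [pairs]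
       else result ++ pvGreedy pairs)
    = (if pairs = [] then result ++ [pairs] else result ++ pairs.foldl pvPlace []) := by
  by_cases he : pairs = []
  · simp [he]
  · simp only [if_neg he]
    rw [pvCounts_eq_counter]
    by_cases hs : (PySem.Dict.counter (pvIons pairs)).values.any (fun c => decide (1 < c)) = false
    · obtain ⟨p, rest, rfl⟩ := List.exists_cons_of_ne_nil he
      rw [if_pos hs]
      have hnd := pvNoShared_nodup _ hs
      rw [List.foldl_cons, show pvPlace [] p = [[p]] from rfl,
          foldl_place_nodup rest [p] (by simpa using hnd)]
      simp
    · rw [if_neg hs, pvGreedy_eq_foldl_place]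

-- ===== VERDICT (by name: the statement is the Claim_ definition above) =====
theorem split_shared_ion_rounds_py_spec : Claim_equal_split_shared_ion_rounds_py := by
  intro phase_pairs _
  unfold Spec_split_shared_ion_rounds_py split_shared_ion_rounds_py split_shared_ion_rounds_py_alt
  congr 1
  funext result pairs
  exact pvStep_eq result pairs
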